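-- pv_equiv track=rewrite | github.com/bhattacharjeeajay12/CandleApp | app.py | _find_actual_volume_column
-- ===== SOURCE A (Python) =====
-- from typing import Dict, List, Optional, Set, Tuple
--
-- def _normalize_column_name(name: object) -> str:
--     text = str(name).strip().lower()
--     return "".join(ch for ch in text if ch.isalnum())
--
-- def _find_actual_volume_column(columns: List[str]) -> Optional[str]:
--     normalized_pairs = [(_normalize_column_name(col), col) for col in columns]
--     preferred = {
--         "actualvolume",
--         "actualvol",
--         "volumeactual",
--         "realvolume",
--     }
--
--     for normalized, original in normalized_pairs:
--         if normalized in preferred: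
--             return original
--
--     for normalized, original in normalized_pairs:
--         if "actual" in normalized and "volume" in normalized:
--             return original
--
--     # Fallback: accept plain "volume" only when there is no better candidate.
--     for normalized, original in normalized_pairs:
--         if normalized == "volume":
--             return original
--
--     return None
-- ===== SOURCE B (Python) =====
-- from typing import List, Optional
--
-- def _normalize_column_name(name: object) -> str:
--     text = str(name).strip().lower()
--     return "".join(ch for ch in text if ch.isalnum())
--
-- _PREFERRED = {"actualvolume", "actualvol", "volumeactual", "realvolume"}
--
-- def _rank(normalized: str) -> Optional[int]:
--     if normalized in _PREFERRED:
--         return 1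
--     if "actual" in normalized and "volume" in normalized:
--         return 2
--     if normalized == "volume":
--         return 3
--     return None
--
-- def _find_actual_volume_column(columns: List[str]) -> Optional[str]:
--     # Single pass keeping the best-ranked candidate seen so far.
--     best_rank = None
--     best_original = None
--     for col in columns:
--         r = _rank(_normalize_column_name(col))
--         if r == 1:
--             return col
--         if r is not None and (best_rank is None or r < best_rank):
--             best_rank, best_original = r, col
--     return best_original
-- ===== Notes on version B (the rewrite author's own statement) =====
-- stated objective: alternative
-- what changed: A makes three sequential scans over the normalized columns (one per priority tier); B normalizes each column once and makes a single pass maintaining the best-ranked candidate, early-returning on a tier-1 hit.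
import Mathlib
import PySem

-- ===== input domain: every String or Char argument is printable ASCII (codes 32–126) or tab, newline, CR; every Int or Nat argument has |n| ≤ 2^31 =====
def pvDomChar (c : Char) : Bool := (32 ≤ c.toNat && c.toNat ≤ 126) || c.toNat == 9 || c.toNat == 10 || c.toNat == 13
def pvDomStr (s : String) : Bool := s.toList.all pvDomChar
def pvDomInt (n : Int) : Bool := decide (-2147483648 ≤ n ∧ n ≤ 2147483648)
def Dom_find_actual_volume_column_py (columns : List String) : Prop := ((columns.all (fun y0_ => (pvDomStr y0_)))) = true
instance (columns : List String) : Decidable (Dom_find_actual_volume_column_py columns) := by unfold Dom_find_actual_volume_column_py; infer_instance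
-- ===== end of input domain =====

-- B replaces A's three sequential scans with one pass keeping the best-ranked candidate (objective: alternative decomposition).

-- ===== PORT A =====
-- shared helper: _normalize_column_name (identical in Source A and Source B)
def normalize_column_name (name : String) : String :=
  let text := PySem.Str.lower (PySem.Str.strip name)
  String.ofList (text.toList.filter (fun ch => PySem.Chars.isalnum ch))

-- the `preferred` set literal (used only for a membership test)
def preferredList : List String := ["actualvolume", "actualvol", "volumeactual", "realvolume"]

def find_actual_volume_column_py (columns : List String) : Option String :=
  let normalized_pairs := columns.map (fun col => (normalize_column_name col, col))
  match normalized_pairs.find? (fun p => preferredList.contains p.1) with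
  | some p => some p.2
  | none =>
    match normalized_pairs.find? (fun p => PySem.Str.isIn "actual" p.1 && PySem.Str.isIn "volume" p.1) with
    | some p => some p.2
    | none =>
      match normalized_pairs.find? (fun p => p.1 == "volume") with
      | some p => some p.2
      | none => none

-- ===== PORT B =====
def rankB (normalized : String) : Option Nat :=
  if preferredList.contains normalized then some 1
  else if PySem.Str.isIn "actual" normalized && PySem.Str.isIn "volume" normalized then some 2
  else if normalized == "volume" then some 3
  else none

-- the loop of Source B: state = (best_rank, best_original) as Option (Nat × String)
-- stepB is the loop's update statement: `if r is not None and (best_rank is None or r < best_rank)`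
def stepB (col : String) (r? : Option Nat) (best : Option (Nat × String)) : Option (Nat × String) :=
  match r?, best with
  | none, best => best
  | some r, none => some (r, col)
  | some r, some (br, bo) => if r < br then some (r, col) else some (br, bo)

def goB : List String → Option (Nat × String) → Option String
  | [], best => best.map Prod.snd
  | col :: rest, best =>
    let r? := rankB (normalize_column_name col)
    if r? == some 1 then some col
    else goB rest (stepB col r? best)

def find_actual_volume_column_py_alt (columns : List String) : Option String :=
  goB columns none

-- ===== PRECONDITION & SPEC =====
def Spec_find_actual_volume_column_py (columns : List String) (out : Option String) : Prop := out = find_actual_volume_column_py_alt columns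
instance (columns : List String) (out : Option String) : Decidable (Spec_find_actual_volume_column_py columns out) := by unfold Spec_find_actual_volume_column_py; infer_instance

-- ===== CLAIM (what is proved, stated in full; the proofs are below) =====
def Claim_equal_find_actual_volume_column_py : Prop := ∀ (columns : List String), Dom_find_actual_volume_column_py columns → Spec_find_actual_volume_column_py columns (find_actual_volume_column_py columns)

-- ===== LEMMAS AND PROOFS =====

-- qk c : column c has rank k
def q1 (c : String) : Bool := rankB (normalize_column_name c) == some 1
def q2 (c : String) : Bool := rankB (normalize_column_name c) == some 2
def q3 (c : String) : Bool := rankB (normalize_column_name c) == some 3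

theorem rankB_eq_one (n : String) :
    (rankB n == some 1) = preferredList.contains n := by
  unfold rankB; split_ifs <;> simp_all

theorem rankB_eq_two (n : String) :
    (rankB n == some 2) =
      (!preferredList.contains n && (PySem.Str.isIn "actual" n && PySem.Str.isIn "volume" n)) := by
  unfold rankB; split_ifs <;> simp_all

theorem rankB_eq_three (n : String) :
    (rankB n == some 3) =
      (!preferredList.contains n && !(PySem.Str.isIn "actual" n && PySem.Str.isIn "volume" n)
        && (n == "volume")) := by
  unfold rankB; split_ifs <;> simp_all <;> decide

theorem rankB_cases {n : String} {r : Nat} (h : rankB n = some r) : r = 1 ∨ r = 2 ∨ r = 3 := by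
  unfold rankB at h; split_ifs at h <;> simp_all

theorem find?_congr' {α : Type} (l : List α) (p q : α → Bool) (h : ∀ a ∈ l, p a = q a) :
    l.find? p = l.find? q := by
  induction l with
  | nil => rfl
  | cons a t ih =>
    simp only [List.find?_cons]
    rw [h a (by simp)]
    cases q a
    · exact ih fun b hb => h b (by simp [hb])
    · rfl

theorem find?_eq_none_mem {α : Type} {l : List α} {p : α → Bool} (h : l.find? p = none) :
    ∀ a ∈ l, p a = false := by
  intro a ha
  simpa using List.find?_eq_none.mp h a ha

-- what the loop still owes when its scanned prefix left `best`
def afterB (best : Option (Nat × String)) (l : List String) : Option String :=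
  match best with
  | none => (l.find? q2).orElse (fun _ => l.find? q3)
  | some (br, bo) => if br ≤ 2 then some bo else (l.find? q2).orElse (fun _ => some bo)

theorem goB_spec : ∀ (l : List String) (best : Option (Nat × String)),
    (∀ p ∈ best, p.1 = 2 ∨ p.1 = 3) →
    goB l best = (l.find? q1).orElse (fun _ => afterB best l) := by
  intro l
  induction l with
  | nil =>
    intro best hb
    match best with
    | none => rfl
    | some (br, bo) =>
      rcases hb (br, bo) rfl with h | h <;> subst h <;> rfl
  | cons c rest ih =>
    intro best hb
    simp only [goB]
    cases hr : rankB (normalize_column_name c) with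
    | none =>
      have hq1 : q1 c = false := by simp [q1, hr]
      have hq2 : q2 c = false := by simp [q2, hr]
      have hq3 : q3 c = false := by simp [q3, hr]
      simp only [show ((none : Option Nat) == some 1) = false from rfl, Bool.false_eq_true,
        if_false, stepB]
      rw [ih _ hb]
      match best with
      | none => simp [hq1, hq2, hq3, afterB]
      | some (br, bo) =>
        by_cases h : br ≤ 2 <;> simp [hq1, hq2, afterB, h]
    | some r =>
      rcases rankB_cases hr with h1 | h2 | h3
      · subst h1
        have hq1 : q1 c = true := by simp [q1, hr]
        simp [hq1]
      · subst h2
        have hq1 : q1 c = false := by simp [q1, hr]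
        have hq2 : q2 c = true := by simp [q2, hr]
        simp only [show ((some 2 : Option Nat) == some 1) = false from rfl, Bool.false_eq_true,
          if_false]
        match best with
        | none =>
          rw [show stepB c (some 2) none = some (2, c) from rfl, ih _ (by simp)]
          simp [List.find?_cons, hq1, hq2, afterB]
        | some (br, bo) =>
          rcases hb (br, bo) rfl with h | h <;> subst h
          · rw [show stepB c (some 2) (some (2, bo)) = some (2, bo) from rfl, ih _ (by simp)]
            simp [hq1, afterB]
          · rw [show stepB c (some 2) (some (3, bo)) = some (2, c) from rfl, ih _ (by simp)]
            simp [hq1, hq2, afterB]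
      · subst h3
        have hq1 : q1 c = false := by simp [q1, hr]
        have hq2 : q2 c = false := by simp [q2, hr]
        have hq3 : q3 c = true := by simp [q3, hr]
        simp only [show ((some 3 : Option Nat) == some 1) = false from rfl, Bool.false_eq_true,
          if_false]
        match best with
        | none =>
          rw [show stepB c (some 3) none = some (3, c) from rfl, ih _ (by simp)]
          simp only [afterB, List.find?_cons, hq1, hq2, hq3]
          cases rest.find? q1 <;> cases rest.find? q2 <;> simp [Option.orElse]
        | some (br, bo) =>
          rcases hb (br, bo) rfl with h | h <;> subst h
          · rw [show stepB c (some 3) (some (2, bo)) = some (2, bo) from rfl, ih _ (by simp)]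
            simp [hq1, afterB]
          · rw [show stepB c (some 3) (some (3, bo)) = some (3, bo) from rfl, ih _ (by simp)]
            simp [hq1, hq2, afterB]

-- A's tiered scans, rewritten onto the column list
theorem A_eq_tiers (columns : List String) :
    find_actual_volume_column_py columns =
      (columns.find? (fun c => preferredList.contains (normalize_column_name c))).orElse (fun _ =>
        (columns.find? (fun c => PySem.Str.isIn "actual" (normalize_column_name c)
              && PySem.Str.isIn "volume" (normalize_column_name c))).orElse (fun _ =>
          columns.find? (fun c => normalize_column_name c == "volume"))) := by
  unfold find_actual_volume_column_py
  dsimp only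
  rw [List.find?_map, List.find?_map, List.find?_map]
  have e1 : ((fun p : String × String => preferredList.contains p.1) ∘
      fun col => (normalize_column_name col, col)) =
      (fun c => preferredList.contains (normalize_column_name c)) := by
    funext c; simp only [Function.comp_apply]
  have e2 : ((fun p : String × String => PySem.Str.isIn "actual" p.1 && PySem.Str.isIn "volume" p.1) ∘
      fun col => (normalize_column_name col, col)) =
      (fun c => PySem.Str.isIn "actual" (normalize_column_name c)
        && PySem.Str.isIn "volume" (normalize_column_name c)) := by
    funext c; simp only [Function.comp_apply]
  have e3 : ((fun p : String × String => p.1 == "volume") ∘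
      fun col => (normalize_column_name col, col)) =
      (fun c => normalize_column_name c == "volume") := by
    funext c; simp only [Function.comp_apply]
  rw [e1, e2, e3]
  cases columns.find? (fun c => preferredList.contains (normalize_column_name c)) <;>
    cases columns.find? (fun c => PySem.Str.isIn "actual" (normalize_column_name c)
        && PySem.Str.isIn "volume" (normalize_column_name c)) <;>
      cases columns.find? (fun c => normalize_column_name c == "volume") <;>
        simp [Option.orElse]

-- ===== VERDICT (by name: the statement is the Claim_ definition above) =====
theorem find_actual_volume_column_py_spec : Claim_equal_find_actual_volume_column_py := by
  intro columns _
  unfold Spec_find_actual_volume_column_py find_actual_volume_column_py_alt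
  rw [goB_spec columns none (by simp), A_eq_tiers]
  have hq1 : columns.find? (fun c => preferredList.contains (normalize_column_name c)) = columns.find? q1 :=
    find?_congr' _ _ _ (fun a _ => by simp [q1, rankB_eq_one])
  rw [hq1]
  cases h1 : columns.find? q1 with
  | some v => simp [Option.orElse]
  | none =>
    have hall1 := find?_eq_none_mem h1
    simp only [Option.orElse, afterB]
    have hq2 : columns.find? (fun c => PySem.Str.isIn "actual" (normalize_column_name c)
        && PySem.Str.isIn "volume" (normalize_column_name c)) = columns.find? q2 := by
      apply find?_congr'
      intro a ha
      have t1 := hall1 a ha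
      simp only [q1, rankB_eq_one] at t1
      have t1' : normalize_column_name a ∉ preferredList := by simpa using t1
      simp [q2, rankB_eq_two, t1']
    rw [hq2]
    cases h2 : columns.find? q2 with
    | some v => simp
    | none =>
      have hall2 := find?_eq_none_mem h2
      apply find?_congr'
      intro a ha
      have t1 := hall1 a ha
      have t2 := hall2 a ha
      simp only [q1, rankB_eq_one] at t1
      have t1' : normalize_column_name a ∉ preferredList := by simpa using t1
      simp only [q2, rankB_eq_two, t1, Bool.not_false, Bool.true_and] at t2
      simp only [PySem.Str.isIn_eq] at t2
      simp [q3, rankB_eq_three, t1']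
      intro _
      rcases Bool.and_eq_false_iff.mp t2 with h | h
      · exact Or.inl h
      · exact Or.inr h
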